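-- pv_equiv track=rewrite | github.com/BaileyChoi/Coding_test | 프로그래머스/2/42626. 더 맵게/더 맵게.py | solution
-- ===== SOURCE A (Python) =====
-- import heapq
--
-- def solution(scoville, K):
--     heap = []
--
--     for s in scoville :
--         heapq.heappush(heap, s)
--     # heapq.heapify(scoville)
--
--     answer = 0
--     quotient = 0
--
--     while heap[0] < K :
--
--         if len(heap) < 2 :
--             return -1
--
--         min1 = heapq.heappop(heap)
--         min2 = heapq.heappop(heap)
--
--         quotient = min1 + (2 * min2)
--         heapq.heappush(heap, quotient)
--         answer += 1
--
--     return answer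
-- ===== SOURCE B (Python) =====
-- def _insert(xs, c):
--     for i, x in enumerate(xs):
--         if c <= x:
--             return xs[:i] + [c] + xs[i:]
--     return xs + [c]
--
-- def solution(scoville, K):
--     lst = sorted(scoville)
--     count = 0
--     while lst[0] < K:
--         if len(lst) < 2:
--             return -1
--         a, b, rest = lst[0], lst[1], lst[2:]
--         lst = _insert(rest, a + 2 * b)
--         count += 1
--     return count
-- ===== Notes on version B (the rewrite author's own statement) =====
-- stated objective: simpler
-- what changed: Replaces the binary heap (heapq push/pop with sift-up/sift-down) by a plain sorted list: sort once, take the two head elements, and re-insert the combined value by an ordered insertion scan.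
import Mathlib
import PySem

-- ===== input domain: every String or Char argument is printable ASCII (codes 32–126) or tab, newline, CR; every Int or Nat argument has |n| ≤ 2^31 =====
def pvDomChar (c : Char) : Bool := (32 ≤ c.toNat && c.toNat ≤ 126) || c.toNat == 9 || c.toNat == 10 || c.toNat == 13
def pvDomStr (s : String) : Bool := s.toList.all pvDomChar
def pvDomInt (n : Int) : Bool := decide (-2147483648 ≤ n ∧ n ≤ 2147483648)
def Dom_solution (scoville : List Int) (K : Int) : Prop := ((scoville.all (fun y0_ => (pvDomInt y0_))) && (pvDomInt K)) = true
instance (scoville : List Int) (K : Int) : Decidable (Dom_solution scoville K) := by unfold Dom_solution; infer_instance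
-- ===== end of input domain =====

-- B replaces A's binary heap (heapq) by a sorted list with ordered re-insertion (simpler).

-- ===== PORT A =====
-- heapq._siftdown(heap, 0, pos): bubble the hole at pos up while newitem < parent, finally place newitem.
def siftDn (h : List Int) (x : Int) (pos : Nat) : List Int :=
  if 0 < pos then
    if x < h.getD ((pos - 1) / 2) 0 then
      siftDn (h.set pos (h.getD ((pos - 1) / 2) 0)) x ((pos - 1) / 2)
    else h.set pos x
  else h.set pos x
termination_by pos
decreasing_by have := Nat.div_le_self (pos - 1) 2; omega

-- heapq.heappush(heap, x): append, then _siftdown(heap, 0, len(heap)-1)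
def heappush (h : List Int) (x : Int) : List Int := siftDn (h ++ [x]) x h.length

-- the smaller-child choice of heapq._siftup: right child if in range and not (left < right), else left
def sChild (h : List Int) (pos : Nat) : Nat :=
  if 2 * pos + 2 < h.length ∧ ¬ (h.getD (2 * pos + 1) 0 < h.getD (2 * pos + 2) 0)
  then 2 * pos + 2 else 2 * pos + 1

lemma sChild_gt (h : List Int) (pos : Nat) : pos < sChild h pos := by
  unfold sChild; split <;> omega

lemma sChild_lt_length (h : List Int) (pos : Nat) (hlt : 2 * pos + 1 < h.length) :
    sChild h pos < h.length := by
  unfold sChild; split <;> omega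

-- heapq._siftup(heap, 0): move the hole down to a leaf along the smaller child, then _siftdown.
def siftUp (h : List Int) (x : Int) (pos : Nat) : List Int :=
  if 2 * pos + 1 < h.length then
    siftUp (h.set pos (h.getD (sChild h pos) 0)) x (sChild h pos)
  else siftDn (h.set pos x) x pos
termination_by h.length - pos
decreasing_by
  simp only [List.length_set]
  have h1 := sChild_gt h pos
  have h2 := sChild_lt_length h pos (by omega)
  omega

-- heapq.heappop(heap): lastelt = heap.pop() (IndexError on []); if heap: swap lastelt to the root, siftup.
def heappop (h : List Int) : Int × List Int :=
  match h.getLast? with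
  | none => (0, [])   -- unreachable under Pre_: Python's heap.pop() raises IndexError on []
  | some lastelt =>
    let h' := h.dropLast
    if h'.isEmpty then (lastelt, [])
    else (h'.getD 0 0, siftUp (h'.set 0 lastelt) lastelt 0)

-- the while loop of A: while heap[0] < K: pop the two minima, push min1 + 2*min2.
-- fuel (the initial heap length) only makes the recursion structural: each iteration
-- pops two and pushes one, so the heap shrinks by one and the fuel never runs out.
def loopA (K : Int) (fuel : Nat) (h : List Int) (ans : Int) : Int :=
  match fuel with
  | 0 => ans
  | fuel + 1 =>
    if h.getD 0 0 < K then
      if h.length < 2 then -1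
      else
        let p1 := heappop h
        let p2 := heappop p1.2
        loopA K fuel (heappush p2.2 (p1.1 + 2 * p2.1)) (ans + 1)
    else ans

def solution (scoville : List Int) (K : Int) : Int :=
  loopA K (scoville.foldl heappush []).length (scoville.foldl heappush []) 0

-- ===== PORT B =====
-- _insert(xs, c): scan for the first x with c <= x and splice c in there
def insSorted (xs : List Int) (c : Int) : List Int :=
  match xs with
  | [] => [c]
  | x :: t => if c ≤ x then c :: x :: t else x :: insSorted t c

lemma length_insSorted (xs : List Int) (c : Int) :
    (insSorted xs c).length = xs.length + 1 := by
  induction xs with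
  | nil => rfl
  | cons x t ih => simp only [insSorted]; split <;> simp [ih]

-- the while loop of B: while lst[0] < K: take the two head elements, re-insert a + 2*b
def loopB (K : Int) (lst : List Int) (count : Int) : Int :=
  match lst with
  | [] => count   -- unreachable under Pre_: Python's lst[0] raises IndexError on []
  | a :: t =>
    if a < K then
      match t with
      | [] => -1
      | b :: rest => loopB K (insSorted rest (a + 2 * b)) (count + 1)
    else count
termination_by lst.length
decreasing_by simp [length_insSorted]

def solution_alt (scoville : List Int) (K : Int) : Int :=
  loopB K (PySem.List.sorted scoville (fun x => x) false) 0

-- ===== PRECONDITION & SPEC =====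
-- Pre_ excludes only the empty list, where Python A raises IndexError at 'heap[0]'.
def Pre_solution (scoville : List Int) (K : Int) : Prop := scoville ≠ []
instance (scoville : List Int) (K : Int) : Decidable (Pre_solution scoville K) := by
  unfold Pre_solution; infer_instance

def pvWitness_solution : List Int × Int := ([1, 2, 3, 9, 10, 12], 7)

def Spec_solution (scoville : List Int) (K : Int) (out : Int) : Prop := out = solution_alt scoville K
instance (scoville : List Int) (K : Int) (out : Int) : Decidable (Spec_solution scoville K out) := by
  unfold Spec_solution; infer_instance

-- ===== CLAIM (what is proved, stated in full; the proofs are below) =====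
def Claim_equal_solution : Prop := ∀ (scoville : List Int) (K : Int), Dom_solution scoville K → Pre_solution scoville K → Spec_solution scoville K (solution scoville K)

-- ===== LEMMAS AND PROOFS =====

-- the binary-heap property in parent form
def IsHeap (h : List Int) : Prop :=
  ∀ i, 0 < i → i < h.length → h.getD ((i - 1) / 2) 0 ≤ h.getD i 0

-- heap-with-a-hole invariant for siftDn: (a) heap away from the hole, (b) grandparent bound over
-- the hole, (c) the item is below the hole's children
def HoleD (h : List Int) (pos : Nat) (x : Int) : Prop :=
  (∀ i, 0 < i → i < h.length → i ≠ pos → (i - 1) / 2 ≠ pos →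
      h.getD ((i - 1) / 2) 0 ≤ h.getD i 0) ∧
  (∀ i, 0 < i → i < h.length → (i - 1) / 2 = pos → 0 < pos →
      h.getD ((pos - 1) / 2) 0 ≤ h.getD i 0) ∧
  (∀ i, 0 < i → i < h.length → (i - 1) / 2 = pos → x ≤ h.getD i 0)

-- heap-with-a-hole invariant for siftUp (no constraint mentioning the item)
def HoleU (h : List Int) (pos : Nat) : Prop :=
  (∀ i, 0 < i → i < h.length → i ≠ pos → (i - 1) / 2 ≠ pos →
      h.getD ((i - 1) / 2) 0 ≤ h.getD i 0) ∧
  (∀ i, 0 < i → i < h.length → (i - 1) / 2 = pos → 0 < pos →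
      h.getD ((pos - 1) / 2) 0 ≤ h.getD i 0)

lemma getD_set_self (h : List Int) (i : Nat) (v : Int) (hi : i < h.length) :
    (h.set i v).getD i 0 = v := by
  simp [List.getD_eq_getElem?_getD, hi]

lemma getD_set_ne (h : List Int) (i j : Nat) (v : Int) (hne : j ≠ i) :
    (h.set i v).getD j 0 = h.getD j 0 := by
  simp [List.getD_eq_getElem?_getD, List.getElem?_set_ne (Ne.symm hne)]

lemma getD_append_left (h : List Int) (x : Int) (j : Nat) (hj : j < h.length) :
    (h ++ [x]).getD j 0 = h.getD j 0 := by
  simp [List.getD_eq_getElem?_getD, List.getElem?_append_left hj]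

lemma perm_cons_set (t : List Int) (k : Nat) (x z : Int) (hk : k < t.length) :
    (x :: t.set k z).Perm (z :: t.set k x) := by
  induction t generalizing k with
  | nil => simp at hk
  | cons y s ih =>
    cases k with
    | zero => simpa using List.Perm.swap z x s
    | succ k =>
      simp only [List.set_cons_succ]
      exact ((List.Perm.swap y x _).trans ((ih k (by simpa using hk)).cons y)).trans
        (List.Perm.swap z y _)

lemma swap_set_perm (h : List Int) (i j : Nat) (x : Int) (hi : i < h.length) (hj : j < h.length) :
    ((h.set i (h.getD j 0)).set j x).Perm (h.set i x) := by
  induction h generalizing i j with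
  | nil => simp at hi
  | cons a t ih =>
    cases i with
    | zero =>
      cases j with
      | zero => simp
      | succ k =>
        simp only [List.getD_cons_succ, List.set_cons_zero, List.set_cons_succ]
        have hk : k < t.length := by simpa using hj
        have := perm_cons_set t k x (t.getD k 0) hk
        calc (t.getD k 0 :: t.set k x).Perm (x :: t.set k (t.getD k 0)) := this.symm
          _ = x :: t := by
              rw [List.getD_eq_getElem t 0 hk, List.set_getElem_self hk]
    | succ i' =>
      cases j with
      | zero =>
        simp only [List.getD_cons_zero, List.set_cons_succ, List.set_cons_zero]
        exact perm_cons_set t i' x a (by simpa using hi)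
      | succ k =>
        simp only [List.getD_cons_succ, List.set_cons_succ]
        exact (ih i' k (by simpa using hi) (by simpa using hj)).cons a

lemma heap_root_le (h : List Int) (hh : IsHeap h) :
    ∀ i, i < h.length → h.getD 0 0 ≤ h.getD i 0 := by
  intro i
  induction i using Nat.strong_induction_on with
  | _ i ih =>
    intro hi
    rcases Nat.eq_zero_or_pos i with h0 | h0
    · subst h0; exact le_refl _
    · have hp : (i - 1) / 2 < i := by omega
      exact (ih _ hp (by omega)).trans (hh i h0 hi)

lemma heap_root_le_mem (h : List Int) (hh : IsHeap h) (x : Int) (hx : x ∈ h) :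
    h.getD 0 0 ≤ x := by
  obtain ⟨i, hi, rfl⟩ := List.mem_iff_getElem.1 hx
  have := heap_root_le h hh i hi
  rwa [List.getD_eq_getElem h 0 hi] at this

lemma siftDn_spec (x : Int) : ∀ (pos : Nat) (h : List Int), pos < h.length → HoleD h pos x →
    IsHeap (siftDn h x pos) ∧ (siftDn h x pos).Perm (h.set pos x) := by
  intro pos
  induction pos using Nat.strong_induction_on with
  | _ pos ih =>
    intro h hpos hinv
    obtain ⟨ha, hb, hc⟩ := hinv
    rw [siftDn]
    by_cases h0 : 0 < pos
    · rw [if_pos h0]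
      by_cases hx : x < h.getD ((pos - 1) / 2) 0
      · rw [if_pos hx]
        have hplt : (pos - 1) / 2 < pos := by omega
        have hplen : (pos - 1) / 2 < (h.set pos (h.getD ((pos - 1) / 2) 0)).length := by
          simp only [List.length_set]; omega
        have hinv' : HoleD (h.set pos (h.getD ((pos - 1) / 2) 0)) ((pos - 1) / 2) x := by
          refine ⟨?_, ?_, ?_⟩
          · intro i hi hilen hip hpp
            rw [List.length_set] at hilen
            by_cases hipos : i = pos
            · subst i; exact absurd rfl hpp
            · by_cases hppos : (i - 1) / 2 = pos
              · rw [hppos, getD_set_self h pos _ hpos, getD_set_ne h pos i _ hipos]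
                exact hb i hi hilen hppos h0
              · rw [getD_set_ne h pos i _ hipos, getD_set_ne h pos _ _ hppos]
                exact ha i hi hilen hipos hppos
          · intro i hi hilen hpar hp0
            rw [List.length_set] at hilen
            have hgp : ((pos - 1) / 2 - 1) / 2 ≠ pos := by omega
            rw [getD_set_ne h pos _ _ hgp]
            have hstep : h.getD (((pos - 1) / 2 - 1) / 2) 0 ≤ h.getD ((pos - 1) / 2) 0 :=
              ha ((pos - 1) / 2) hp0 (by omega) (by omega) (by omega)
            by_cases hipos : i = pos
            · subst i
              rw [getD_set_self h pos _ hpos]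
              exact hstep
            · rw [getD_set_ne h pos i _ hipos]
              refine hstep.trans ?_
              have := ha i hi hilen hipos (by omega)
              rwa [hpar] at this
          · intro i hi hilen hpar
            rw [List.length_set] at hilen
            by_cases hipos : i = pos
            · subst i
              rw [getD_set_self h pos _ hpos]
              exact hx.le
            · rw [getD_set_ne h pos i _ hipos]
              refine hx.le.trans ?_
              have := ha i hi hilen hipos (by omega)
              rwa [hpar] at this
        obtain ⟨k1, k2⟩ := ih _ hplt _ hplen hinv'
        exact ⟨k1, k2.trans (swap_set_perm h pos ((pos - 1) / 2) x hpos (by omega))⟩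
      · rw [if_neg hx]
        rw [not_lt] at hx
        refine ⟨?_, List.Perm.refl _⟩
        intro i hi hilen
        rw [List.length_set] at hilen
        by_cases hip : i = pos
        · subst i
          rw [getD_set_self h pos x hpos, getD_set_ne h pos _ x (by omega)]
          exact hx
        · by_cases hpp : (i - 1) / 2 = pos
          · rw [getD_set_ne h pos i x hip, hpp, getD_set_self h pos x hpos]
            exact hc i hi hilen hpp
          · rw [getD_set_ne h pos i x hip, getD_set_ne h pos _ x hpp]
            exact ha i hi hilen hip hpp
    · rw [if_neg h0]
      have hpos0 : pos = 0 := by omega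
      subst hpos0
      refine ⟨?_, List.Perm.refl _⟩
      intro i hi hilen
      rw [List.length_set] at hilen
      by_cases hpp : (i - 1) / 2 = 0
      · rw [getD_set_ne h 0 i x (by omega), hpp, getD_set_self h 0 x hpos]
        exact hc i hi hilen hpp
      · rw [getD_set_ne h 0 i x (by omega), getD_set_ne h 0 _ x hpp]
        exact ha i hi hilen (by omega) hpp

lemma sChild_cases (h : List Int) (pos : Nat) :
    sChild h pos = 2 * pos + 1 ∨ sChild h pos = 2 * pos + 2 := by
  unfold sChild; split
  · right; rfl
  · left; rfl

lemma sChild_min (h : List Int) (pos : Nat) (hlt : 2 * pos + 1 < h.length) :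
    h.getD (sChild h pos) 0 ≤ h.getD (2 * pos + 1) 0 ∧
      (2 * pos + 2 < h.length → h.getD (sChild h pos) 0 ≤ h.getD (2 * pos + 2) 0) := by
  unfold sChild; split
  · rename_i hcnd
    exact ⟨not_lt.1 hcnd.2, fun _ => le_refl _⟩
  · rename_i hcnd
    refine ⟨le_refl _, fun hr => ?_⟩
    rcases not_and_or.1 hcnd with hr' | hlr
    · exact absurd hr hr'
    · exact (not_not.1 hlr).le

lemma siftUp_spec (h : List Int) (x : Int) (pos : Nat) : pos < h.length → HoleU h pos →
    IsHeap (siftUp h x pos) ∧ (siftUp h x pos).Perm (h.set pos x) := by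
  fun_induction siftUp h x pos with
  | case1 h pos hlt ih =>
    intro hpos hinv
    obtain ⟨ha, hb⟩ := hinv
    have hcgt := sChild_gt h pos
    have hclt := sChild_lt_length h pos hlt
    have hccase := sChild_cases h pos
    have hcpar : (sChild h pos - 1) / 2 = pos := by omega
    obtain ⟨hmin1, hmin2⟩ := sChild_min h pos hlt
    have hinv' : HoleU (h.set pos (h.getD (sChild h pos) 0)) (sChild h pos) := by
      constructor
      · intro i hi hilen hic hpic
        rw [List.length_set] at hilen
        by_cases hip : i = pos
        · subst i
          have hppos : (pos - 1) / 2 ≠ pos := by omega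
          rw [getD_set_self h pos _ hpos, getD_set_ne h pos _ _ hppos]
          exact hb (sChild h pos) (by omega) hclt hcpar hi
        · by_cases hpip : (i - 1) / 2 = pos
          · rw [hpip, getD_set_self h pos _ hpos, getD_set_ne h pos i _ hip]
            have : i = 2 * pos + 1 ∨ i = 2 * pos + 2 := by omega
            rcases this with rfl | rfl
            · exact hmin1
            · exact hmin2 hilen
          · rw [getD_set_ne h pos i _ hip, getD_set_ne h pos _ _ hpip]
            exact ha i hi hilen hip hpip
      · intro i hi hilen hpic hc0
        rw [List.length_set] at hilen
        have hip : i ≠ pos := by omega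
        rw [hcpar, getD_set_self h pos _ hpos, getD_set_ne h pos i _ hip]
        have := ha i hi hilen hip (by omega)
        rwa [hpic] at this
    obtain ⟨k1, k2⟩ := ih (by rw [List.length_set]; exact hclt) hinv'
    exact ⟨k1, k2.trans (swap_set_perm h pos (sChild h pos) x hpos hclt)⟩
  | case2 h pos hlt =>
    intro hpos hinv
    obtain ⟨ha, hb⟩ := hinv
    have hinv' : HoleD (h.set pos x) pos x := by
      refine ⟨?_, ?_, ?_⟩
      · intro i hi hilen hip hpip
        rw [List.length_set] at hilen
        rw [getD_set_ne h pos i _ hip, getD_set_ne h pos _ _ hpip]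
        exact ha i hi hilen hip hpip
      · intro i hi hilen hpar hp0
        rw [List.length_set] at hilen
        rw [getD_set_ne h pos i _ (by omega), getD_set_ne h pos _ _ (by omega)]
        exact hb i hi hilen hpar hp0
      · intro i hi hilen hpar
        exfalso
        rw [List.length_set] at hilen
        omega
    obtain ⟨k1, k2⟩ := siftDn_spec x pos (h.set pos x) (by rw [List.length_set]; exact hpos) hinv'
    refine ⟨k1, k2.trans ?_⟩
    rw [List.set_set]

lemma set_append_len (h : List Int) (x y : Int) : (h ++ [x]).set h.length y = h ++ [y] := by
  induction h with
  | nil => rfl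
  | cons a t ih => simpa using ih

lemma heappush_spec (h : List Int) (x : Int) (hh : IsHeap h) :
    IsHeap (heappush h x) ∧ (heappush h x).Perm (x :: h) := by
  have key := siftDn_spec x h.length (h ++ [x]) (by simp) ?_
  · obtain ⟨k1, k2⟩ := key
    refine ⟨k1, k2.trans ?_⟩
    rw [set_append_len]
    exact List.perm_append_singleton x h
  · refine ⟨?_, ?_, ?_⟩
    · intro i hi hilen hine hpne
      simp only [List.length_append, List.length_cons, List.length_nil] at hilen
      have hilt : i < h.length := by omega
      rw [getD_append_left h x i hilt, getD_append_left h x _ (by omega)]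
      exact hh i hi hilt
    · intro i hi hilen hpar h0
      exfalso
      simp only [List.length_append, List.length_cons, List.length_nil] at hilen
      omega
    · intro i hi hilen hpar
      exfalso
      simp only [List.length_append, List.length_cons, List.length_nil] at hilen
      omega

lemma getD_dropLast (h : List Int) (j : Nat) (hj : j < h.dropLast.length) :
    h.dropLast.getD j 0 = h.getD j 0 := by
  have hj' : j < h.length := by simp only [List.length_dropLast] at hj; omega
  rw [List.getD_eq_getElem _ 0 hj, List.getD_eq_getElem _ 0 hj']
  exact List.getElem_dropLast ..

lemma heappop_spec (h : List Int) (hh : IsHeap h) (hne : h ≠ []) :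
    (heappop h).1 = h.getD 0 0 ∧ IsHeap (heappop h).2 ∧
      ((heappop h).1 :: (heappop h).2).Perm h := by
  unfold heappop
  rw [List.getLast?_eq_some_getLast hne]
  by_cases he : h.dropLast.isEmpty
  · have h0 : h.dropLast.length = h.length - 1 := List.length_dropLast
    rw [List.isEmpty_iff.1 he] at h0
    have hpos := List.length_pos_of_ne_nil hne
    have hlen1 : h.length = 1 := by simp at h0; omega
    obtain ⟨a, rfl⟩ := List.length_eq_one_iff.1 hlen1
    simp only [he, if_true]
    refine ⟨by simp, ?_, by simp⟩
    intro i hi hilen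
    simp at hilen
  · rw [Bool.not_eq_true] at he
    simp only [he, Bool.false_eq_true, if_false]
    have hdne : h.dropLast ≠ [] := fun e => by rw [e] at he; simp at he
    have hdpos := List.length_pos_of_ne_nil hdne
    have hlen2 : 2 ≤ h.length := by
      have := List.length_dropLast (xs := h); omega
    have hg0 : h.dropLast.getD 0 0 = h.getD 0 0 := getD_dropLast h 0 hdpos
    have hinv' : HoleU (h.dropLast.set 0 (h.getLast hne)) 0 := by
      constructor
      · intro i hi hilen hi0 hp0
        rw [List.length_set] at hilen
        rw [getD_set_ne _ 0 i _ (by omega), getD_set_ne _ 0 _ _ hp0]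
        rw [getD_dropLast h i hilen, getD_dropLast h _ (by omega)]
        exact hh i hi (by simp only [List.length_dropLast] at hilen; omega)
      · intro i hi hilen hpar h00
        exact absurd h00 (lt_irrefl 0)
    obtain ⟨k1, k2⟩ := siftUp_spec (h.dropLast.set 0 (h.getLast hne)) (h.getLast hne) 0
      (by rw [List.length_set]; exact hdpos) hinv'
    refine ⟨hg0, k1, ?_⟩
    have k2' : (siftUp (h.dropLast.set 0 (h.getLast hne)) (h.getLast hne) 0).Perm
        (h.dropLast.set 0 (h.getLast hne)) := by
      have := k2
      rwa [List.set_set] at this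
    refine ((List.Perm.refl _).cons _ |>.trans (k2'.cons _)).trans ?_
    obtain ⟨a0, tl, hd⟩ : ∃ a0 tl, h.dropLast = a0 :: tl := by
      cases hdl : h.dropLast with
      | nil => exact absurd hdl hdne
      | cons a0 tl => exact ⟨a0, tl, rfl⟩
    rw [hd]
    simp only [List.getD_cons_zero]
    have hback : h.dropLast ++ [h.getLast hne] = h := List.dropLast_append_getLast hne
    calc (a0 :: (a0 :: tl).set 0 (h.getLast hne)).Perm (a0 :: (tl ++ [h.getLast hne])) := by
          simp only [List.set_cons_zero]
          exact ((List.perm_append_singleton _ tl).symm).cons a0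
      _ = (a0 :: tl) ++ [h.getLast hne] := rfl
      _ = h := by rw [← hd]; exact hback

lemma foldl_heappush_spec (l : List Int) : ∀ acc, IsHeap acc →
    IsHeap (l.foldl heappush acc) ∧ (l.foldl heappush acc).Perm (acc ++ l) := by
  induction l with
  | nil =>
    intro acc hacc
    simp only [List.foldl_nil, List.append_nil]
    exact ⟨hacc, List.Perm.refl _⟩
  | cons x t ih =>
    intro acc hacc
    obtain ⟨hh1, hp1⟩ := heappush_spec acc x hacc
    obtain ⟨hh2, hp2⟩ := ih (heappush acc x) hh1
    refine ⟨hh2, hp2.trans ((hp1.append_right t).trans ?_)⟩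
    simpa using (List.perm_middle (a := x) (l₁ := acc) (l₂ := t)).symm

lemma insSorted_perm (xs : List Int) (c : Int) : (insSorted xs c).Perm (c :: xs) := by
  induction xs with
  | nil => simp [insSorted]
  | cons x t ih =>
    simp only [insSorted]
    split
    · exact List.Perm.refl _
    · exact (ih.cons x).trans (List.Perm.swap c x t)

lemma insSorted_pairwise (xs : List Int) (c : Int) (hs : xs.Pairwise (· ≤ ·)) :
    (insSorted xs c).Pairwise (· ≤ ·) := by
  induction xs with
  | nil => simp [insSorted]
  | cons x t ih =>
    simp only [insSorted]
    rw [List.pairwise_cons] at hs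
    split
    · rename_i hcx
      refine List.Pairwise.cons ?_ (List.Pairwise.cons hs.1 hs.2)
      intro y hy
      rcases List.mem_cons.1 hy with rfl | hy
      · exact hcx
      · exact hcx.trans (hs.1 y hy)
    · rename_i hcx
      refine List.Pairwise.cons ?_ (ih hs.2)
      intro y hy
      have : y ∈ c :: t := (insSorted_perm t c).mem_iff.1 hy
      rcases List.mem_cons.1 this with rfl | hy'
      · omega
      · exact hs.1 y hy'

lemma loopB_ge (K a : Int) (t : List Int) (c : Int) (hK : ¬ a < K) : loopB K (a :: t) c = c := by
  rw [loopB.eq_def]; simp [hK]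

lemma loopB_one (K a : Int) (c : Int) (hK : a < K) : loopB K [a] c = -1 := by
  rw [loopB.eq_def]; simp [hK]

lemma loopB_step (K a b : Int) (rest : List Int) (c : Int) (hK : a < K) :
    loopB K (a :: b :: rest) c = loopB K (insSorted rest (a + 2 * b)) (c + 1) := by
  rw [loopB.eq_def]; simp [hK]

lemma loop_eq (K : Int) : ∀ (n : Nat) (h l : List Int) (ans : Int), h.length ≤ n → h ≠ [] →
    h.Perm l → IsHeap h → l.Pairwise (· ≤ ·) → loopA K n h ans = loopB K l ans := by
  intro n
  induction n with
  | zero =>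
    intro h l ans hlen hne
    cases h with
    | nil => exact absurd rfl hne
    | cons a t => simp at hlen
  | succ n ih =>
    intro h l ans hlen hne hperm hheap hsort
    cases l with
    | nil => exact absurd (hperm.eq_nil) hne
    | cons a t =>
      have hhlen : h.length = t.length + 1 := by
        have := hperm.length_eq; simpa using this
      have hroot : h.getD 0 0 = a := by
        have h0mem : h.getD 0 0 ∈ h := by
          rw [List.getD_eq_getElem h 0 (by omega)]
          exact List.getElem_mem _
        have hamem : a ∈ h := hperm.mem_iff.2 (List.mem_cons_self)
        refine le_antisymm (heap_root_le_mem h hheap a hamem) ?_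
        have : h.getD 0 0 ∈ a :: t := hperm.mem_iff.1 h0mem
        rcases List.mem_cons.1 this with heq | hmem
        · exact le_of_eq heq.symm
        · exact (List.pairwise_cons.1 hsort).1 _ hmem
      simp only [loopA]
      rw [hroot]
      by_cases hK : a < K
      · rw [if_pos hK]
        cases t with
        | nil =>
          rw [loopB_one K a ans hK, if_pos (by simp at hhlen; omega)]
        | cons b rest =>
          rw [loopB_step K a b rest ans hK, if_neg (by simp at hhlen ⊢; omega)]
          obtain ⟨e1, hh1, hp1⟩ := heappop_spec h hheap hne
          have h1perm : (heappop h).2.Perm (b :: rest) := by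
            have : ((heappop h).1 :: (heappop h).2).Perm (a :: b :: rest) := hp1.trans hperm
            rw [e1, hroot] at this
            exact this.cons_inv
          have h1ne : (heappop h).2 ≠ [] := by
            intro e; rw [e] at h1perm
            exact (by simp : b :: rest ≠ []) h1perm.symm.eq_nil
          obtain ⟨e2, hh2, hp2⟩ := heappop_spec (heappop h).2 hh1 h1ne
          have hsort' := List.pairwise_cons.1 hsort
          have hroot1 : (heappop h).2.getD 0 0 = b := by
            have h0mem : (heappop h).2.getD 0 0 ∈ (heappop h).2 := by
              rw [List.getD_eq_getElem _ 0 (List.length_pos_of_ne_nil h1ne)]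
              exact List.getElem_mem _
            have hbmem : b ∈ (heappop h).2 := h1perm.mem_iff.2 (List.mem_cons_self)
            refine le_antisymm (heap_root_le_mem _ hh1 b hbmem) ?_
            have : (heappop h).2.getD 0 0 ∈ b :: rest := h1perm.mem_iff.1 h0mem
            rcases List.mem_cons.1 this with heq | hmem
            · exact le_of_eq heq.symm
            · exact (List.pairwise_cons.1 hsort'.2).1 _ hmem
          have h2perm : (heappop (heappop h).2).2.Perm rest := by
            have : ((heappop (heappop h).2).1 :: (heappop (heappop h).2).2).Perm (b :: rest) :=
              hp2.trans h1perm
            rw [e2, hroot1] at this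
            exact this.cons_inv
          obtain ⟨hh3, hp3⟩ := heappush_spec (heappop (heappop h).2).2
            ((heappop h).1 + 2 * (heappop (heappop h).2).1) hh2
          show loopA K n (heappush (heappop (heappop h).2).2
              ((heappop h).1 + 2 * (heappop (heappop h).2).1)) (ans + 1) =
            loopB K (insSorted rest (a + 2 * b)) (ans + 1)
          rw [e1, e2, hroot, hroot1] at hp3 hh3 ⊢
          apply ih
          · have := hp3.length_eq
            have h2len := h2perm.length_eq
            simp only [List.length_cons] at this
            simp only [hhlen, List.length_cons] at hlen ⊢
            omega
          · intro e
            rw [e] at hp3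
            exact (by simp : (a + 2 * b) :: (heappop (heappop h).2).2 ≠ []) hp3.symm.eq_nil
          · exact hp3.trans ((h2perm.cons _).trans (insSorted_perm rest (a + 2 * b)).symm)
          · exact hh3
          · exact insSorted_pairwise rest (a + 2 * b) (List.pairwise_cons.1 hsort'.2).2
      · rw [if_neg hK, loopB_ge K a t ans hK]

-- ===== VERDICT (by name: the statement is the Claim_ definition above) =====
theorem solution_spec : Claim_equal_solution := by
  intro scoville K _ hpre
  unfold Spec_solution solution solution_alt
  obtain ⟨hh, hp⟩ := foldl_heappush_spec scoville [] (by intro i h1 h2; simp at h2)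
  simp only [List.nil_append] at hp
  have hsp : (PySem.List.sorted scoville (fun x => x) false).Perm scoville :=
    PySem.List.sorted_perm ..
  have hpair : (PySem.List.sorted scoville (fun x => x) false).Pairwise (· ≤ ·) := by
    have := PySem.List.sorted_pairwise (xs := scoville) (key := fun x => x)
    simpa using this
  refine loop_eq K (scoville.foldl heappush []).length _ _ 0 le_rfl ?_ (hp.trans hsp.symm) hh hpair
  intro e
  rw [e] at hp
  exact hpre (hp.symm.eq_nil)
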